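-- pv_equiv track=rewrite | github.com/victoriafil/lt2222-v23-a3 | a3_features.py | remove_footer
-- ===== SOURCE A (Python) =====
-- def remove_footer(text):
--     """function that removes email signatures"""
--     #I am aware that this is probably not the most efficient way of stripping the signatures
--     things_to_strip = ["Susan Bailey", "Dean","Dutch","dq", "Eric", "Holden", "Jim Schwieger","Jim","Swig","dutch","Susan S. Bailey","Dan","-----Original Message-----", "Stephanie","Stephanie Panus", " -----Original Message-----","Larry May", "Larry","Craig", "Tom Donohoe", "Tom Donohoe.", "Kam", "KK", ":cc", "Ken","Ken Lay"]
--     for index, line in enumerate(text):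
--         for phrase in things_to_strip:
--             if phrase in line:
--                 text = text[:index]
--                 if '\n' in text:
--                     text.remove('\n')
--     return text
-- ===== SOURCE B (Python) =====
-- def remove_footer(text):
--     """function that removes email signatures"""
--     things_to_strip = ["Susan Bailey", "Dean","Dutch","dq", "Eric", "Holden", "Jim Schwieger","Jim","Swig","dutch","Susan S. Bailey","Dan","-----Original Message-----", "Stephanie","Stephanie Panus", " -----Original Message-----","Larry May", "Larry","Craig", "Tom Donohoe", "Tom Donohoe.", "Kam", "KK", ":cc", "Ken","Ken Lay"]
--     for i, line in enumerate(text):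
--         if any(phrase in line for phrase in things_to_strip):
--             return text[:i]
--     return text
-- ===== Notes on version B (the rewrite author's own statement) =====
-- stated objective: simpler
-- what changed: B replaces A's nested mutate-while-iterating loops (repeated slicing of the list being enumerated plus a conditional remove('\n') per phrase match) by a single scan that returns text[:i] at the first line containing any signature phrase.
-- intended difference: On inputs where some line contains a signature phrase and a newline element occurs before the first such line, A additionally deletes one newline element from that prefix per phrase match anywhere in the original list (a stale-enumerate remove() artefact), while B returns the prefix intact, the intended truncation at the signature. — e.g. on remove_footer(["\n", "Dean"]): A returns [], B returns ["\n"]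
import Mathlib
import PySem

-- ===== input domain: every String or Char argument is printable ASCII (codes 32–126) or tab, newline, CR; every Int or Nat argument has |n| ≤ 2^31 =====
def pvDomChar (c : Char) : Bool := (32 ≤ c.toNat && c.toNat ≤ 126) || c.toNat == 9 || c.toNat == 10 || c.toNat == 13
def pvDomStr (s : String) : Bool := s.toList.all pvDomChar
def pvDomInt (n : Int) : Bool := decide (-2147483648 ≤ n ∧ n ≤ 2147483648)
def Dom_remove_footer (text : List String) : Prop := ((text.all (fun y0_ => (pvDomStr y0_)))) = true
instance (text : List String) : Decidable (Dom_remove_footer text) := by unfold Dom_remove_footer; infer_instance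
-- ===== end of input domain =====

-- B simply truncates at the first line containing a signature phrase (objective: simpler);
-- where A also drains '\n' elements from the prefix, the intended difference D_ below applies.

-- ===== PORT A =====
def things_to_strip : List String := ["Susan Bailey", "Dean","Dutch","dq", "Eric", "Holden", "Jim Schwieger","Jim","Swig","dutch","Susan S. Bailey","Dan","-----Original Message-----", "Stephanie","Stephanie Panus", " -----Original Message-----","Larry May", "Larry","Craig", "Tom Donohoe", "Tom Donohoe.", "Kam", "KK", ":cc", "Ken","Ken Lay"]

-- text.remove('\n'): remove the first "\n"; in A it is guarded by «'\n' in text»,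
-- where PySem.List.remove? returns some, so .getD is exact there.
def removeNl (xs : List String) : List String := (PySem.List.remove? xs "\n").getD xs

-- «text = text[:index]; if '\n' in text: text.remove('\n')» applied to an already-sliced list
def stripNl (xs : List String) : List String := if xs.contains "\n" then removeNl xs else xs

def remove_footer (text : List String) : List String :=
  (PySem.List.enumerate text).foldl
    (fun cur p => things_to_strip.foldl
      (fun cur phrase =>
        if PySem.Str.isIn phrase p.2 then stripNl (PySem.List.slice cur none (some p.1)) else cur)
      cur)
    text

-- ===== PORT B =====
-- «any(phrase in line for phrase in things_to_strip)»
def matchesLine (line : String) : Bool := things_to_strip.any (fun phrase => PySem.Str.isIn phrase line)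

-- «for i, line in enumerate(text): if …: return text[:i]» with early return
def altGo (text : List String) : Nat → List String → List String
  | _, [] => text
  | i, line :: rest => if matchesLine line then text.take i else altGo text (i+1) rest

def remove_footer_alt (text : List String) : List String := altGo text 0 text

-- ===== PRECONDITION & SPEC =====
-- On inputs where some line contains a signature phrase and a "\n" element occurs before the
-- first such line, A additionally deletes one "\n" from the prefix per phrase match anywhere in
-- the original list (a stale-enumerate remove() artefact); B returns the prefix intact, the
-- intended truncation at the signature.
def D_remove_footer (text : List String) : Prop :=
  text.any (fun l => things_to_strip.any (fun phrase => PySem.Str.isIn phrase l)) = true ∧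
    "\n" ∈ text.takeWhile (fun l => !things_to_strip.any (fun phrase => PySem.Str.isIn phrase l))
instance (text : List String) : Decidable (D_remove_footer text) := by unfold D_remove_footer; infer_instance

def Spec_remove_footer (text : List String) (out : List String) : Prop := ¬ D_remove_footer text → out = remove_footer_alt text
instance (text : List String) (out : List String) : Decidable (Spec_remove_footer text out) := by unfold Spec_remove_footer; infer_instance

def pvDiffWitness_remove_footer : List String := ["\n", "Dean"]
def pvDiffWitnessOut_remove_footer : (List String) × (List String) := ([], ["\n"])

-- ===== CLAIM (what is proved, stated in full; the proofs are below) =====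
def Claim_unchanged_remove_footer : Prop := ∀ (text : List String), Dom_remove_footer text → Spec_remove_footer text (remove_footer text)
def Claim_changed_remove_footer : Prop := Dom_remove_footer (pvDiffWitness_remove_footer) ∧ D_remove_footer (pvDiffWitness_remove_footer) ∧ remove_footer (pvDiffWitness_remove_footer) = pvDiffWitnessOut_remove_footer.1 ∧ remove_footer_alt (pvDiffWitness_remove_footer) = pvDiffWitnessOut_remove_footer.2 ∧ pvDiffWitnessOut_remove_footer.1 ≠ pvDiffWitnessOut_remove_footer.2
def Claim_exact_remove_footer : Prop := ∀ (text : List String), Dom_remove_footer text → D_remove_footer text → remove_footer text ≠ remove_footer_alt text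

-- ===== LEMMAS AND PROOFS =====

def countLine (line : String) : Nat :=
  things_to_strip.countP (fun phrase => PySem.Str.isIn phrase line)

-- proof-side restatement of A's two loops, with a Nat line index
def innerA (j : Nat) (line : String) (cur : List String) : List String :=
  things_to_strip.foldl
    (fun cur phrase => if PySem.Str.isIn phrase line then stripNl (cur.take j) else cur) cur

def outerA (j : Nat) : List String → List String → List String
  | [], cur => cur
  | line :: rest, cur => outerA (j+1) rest (innerA j line cur)

theorem length_removeNl_lt (xs : List String) (h : "\n" ∈ xs) :
    (removeNl xs).length + 1 = xs.length := by
  unfold removeNl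
  rw [PySem.List.remove?_eq_some_erase xs "\n" h]
  have := List.length_erase_of_mem h
  have hpos : 0 < xs.length := List.length_pos_of_mem h
  simp only [Option.getD_some]
  omega

theorem length_removeNl_le (xs : List String) : (removeNl xs).length ≤ xs.length := by
  unfold removeNl
  by_cases h : "\n" ∈ xs
  · rw [PySem.List.remove?_eq_some_erase xs "\n" h]
    simpa using (List.length_erase_le : (xs.erase "\n").length ≤ xs.length)
  · rw [(PySem.List.remove?_eq_none_iff xs "\n").2 h]; simp

theorem length_stripNl_le (xs : List String) : (stripNl xs).length ≤ xs.length := by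
  unfold stripNl
  split_ifs with h
  · exact length_removeNl_le xs
  · exact le_rfl

theorem length_iterate_stripNl_le (n : Nat) (xs : List String) :
    (stripNl^[n] xs).length ≤ xs.length := by
  induction n generalizing xs with
  | zero => simp
  | succ n ih =>
    rw [Function.iterate_succ_apply]
    exact le_trans (ih (stripNl xs)) (length_stripNl_le xs)

theorem stripNl_of_not_mem (xs : List String) (h : "\n" ∉ xs) : stripNl xs = xs := by
  unfold stripNl
  rw [if_neg (by simpa using h)]

-- generalized inner-loop lemmas over an arbitrary phrase list
theorem innerP_of_le (P : List String) (line : String) (j : Nat) (cur : List String)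
    (h : cur.length ≤ j) :
    P.foldl (fun cur phrase => if PySem.Str.isIn phrase line then stripNl (cur.take j) else cur) cur
      = stripNl^[P.countP (fun phrase => PySem.Str.isIn phrase line)] cur := by
  induction P generalizing cur with
  | nil => simp
  | cons p P ih =>
    rw [List.foldl_cons]
    by_cases hp : PySem.Str.isIn p line
    · rw [if_pos hp, List.take_of_length_le h,
        ih (stripNl cur) (le_trans (length_stripNl_le cur) h),
        List.countP_cons_of_pos (p := fun phrase => PySem.Str.isIn phrase line) hp, ← Function.iterate_succ_apply]
    · rw [if_neg hp, ih cur h, List.countP_cons_of_neg (p := fun phrase => PySem.Str.isIn phrase line) hp]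

theorem innerP_first (P : List String) (line : String) (j : Nat) (cur : List String)
    (h : 0 < P.countP (fun phrase => PySem.Str.isIn phrase line)) :
    P.foldl (fun cur phrase => if PySem.Str.isIn phrase line then stripNl (cur.take j) else cur) cur
      = stripNl^[P.countP (fun phrase => PySem.Str.isIn phrase line)] (cur.take j) := by
  induction P generalizing cur with
  | nil => simp at h
  | cons p P ih =>
    rw [List.foldl_cons]
    by_cases hp : PySem.Str.isIn p line
    · have hlen : (stripNl (cur.take j)).length ≤ j :=
        le_trans (length_stripNl_le _) (by simp)
      rw [if_pos hp, innerP_of_le P line j _ hlen,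
        List.countP_cons_of_pos (p := fun phrase => PySem.Str.isIn phrase line) hp, ← Function.iterate_succ_apply]
    · rw [List.countP_cons_of_neg (p := fun phrase => PySem.Str.isIn phrase line) hp] at h
      rw [if_neg hp, ih cur h, List.countP_cons_of_neg (p := fun phrase => PySem.Str.isIn phrase line) hp]

theorem innerP_zero (P : List String) (line : String) (j : Nat) (cur : List String)
    (h : P.countP (fun phrase => PySem.Str.isIn phrase line) = 0) :
    P.foldl (fun cur phrase => if PySem.Str.isIn phrase line then stripNl (cur.take j) else cur) cur
      = cur := by
  induction P generalizing cur with
  | nil => simp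
  | cons p P ih =>
    by_cases hp : PySem.Str.isIn p line
    · rw [List.countP_cons_of_pos (p := fun phrase => PySem.Str.isIn phrase line) hp] at h; omega
    · rw [List.countP_cons_of_neg (p := fun phrase => PySem.Str.isIn phrase line) hp] at h
      rw [List.foldl_cons, if_neg hp]
      exact ih cur h

theorem outerA_of_le (lines : List String) (j : Nat) (cur : List String)
    (h : cur.length ≤ j) :
    outerA j lines cur = stripNl^[(lines.map countLine).sum] cur := by
  induction lines generalizing j cur with
  | nil => simp [outerA]
  | cons line rest ih =>
    rw [outerA, innerA, innerP_of_le things_to_strip line j cur h]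
    rw [ih (j+1) _ (le_trans (le_trans (length_iterate_stripNl_le _ _) h) (Nat.le_succ j))]
    rw [← Function.iterate_add_apply, List.map_cons, List.sum_cons, countLine]
    ring_nf

theorem outerA_main (lines : List String) (j : Nat) (cur : List String) :
    outerA j lines cur =
      match (lines.map countLine).findIdx? (fun c => 0 < c) with
      | none => cur
      | some k => stripNl^[(lines.map countLine).sum] (cur.take (j + k)) := by
  induction lines generalizing j cur with
  | nil => simp [outerA]
  | cons line rest ih =>
    rw [outerA, List.map_cons, List.findIdx?_cons, List.sum_cons]
    by_cases hc : 0 < countLine line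
    · simp only [hc, decide_true, if_true]
      rw [innerA, countLine] at *
      rw [innerP_first things_to_strip line j cur hc]
      have hlen : (stripNl^[things_to_strip.countP (fun phrase => PySem.Str.isIn phrase line)] (cur.take j)).length ≤ j + 1 :=
        le_trans (le_trans (length_iterate_stripNl_le _ _) (by simp)) (Nat.le_succ j)
      rw [outerA_of_le rest (j+1) _ hlen, ← Function.iterate_add_apply]
      have : (rest.map countLine).sum + things_to_strip.countP (fun phrase => PySem.Str.isIn phrase line)
          = things_to_strip.countP (fun phrase => PySem.Str.isIn phrase line) + (rest.map countLine).sum := by ring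
      rw [this]
      simp [countLine]
    · have hc0 : countLine line = 0 := by omega
      simp only [hc, decide_false, if_false]
      rw [innerA, innerP_zero things_to_strip line j cur (by rwa [countLine] at hc0)]
      rw [ih (j+1) cur]
      rcases hfind : (rest.map countLine).findIdx? (fun c => 0 < c) with _ | k
      · simp [hfind]
      · simp only [hfind, Option.map_some, hc0]
        norm_num
        rw [show j + 1 + k = j + (k + 1) from by omega]

-- A's fold over enumerate equals the proof-side restatement
theorem foldA_enum (lines : List String) (s : Nat) (cur : List String) :
    (PySem.List.enumerate lines (s : Int)).foldl
      (fun cur p => things_to_strip.foldl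
        (fun cur phrase =>
          if PySem.Str.isIn phrase p.2 then stripNl (PySem.List.slice cur none (some p.1)) else cur)
        cur)
      cur = outerA s lines cur := by
  induction lines generalizing s cur with
  | nil => simp [PySem.List.enumerate_nil, outerA]
  | cons line rest ih =>
    rw [PySem.List.enumerate_cons, List.foldl_cons, outerA]
    have hcast : (s : Int) + 1 = ((s + 1 : Nat) : Int) := by push_cast; ring
    rw [hcast, ih (s+1)]
    congr 1
    rw [innerA]
    congr 1
    funext cur phrase
    rw [PySem.List.slice_to_natCast]

theorem remove_footer_eq_outer (text : List String) :
    remove_footer text = outerA 0 text text := by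
  rw [remove_footer,
    show PySem.List.enumerate text = PySem.List.enumerate text ((0:Nat):Int) by norm_num]
  exact foldA_enum text 0 text

-- the two findIdx? computations agree
theorem findIdx_counts (text : List String) :
    (text.map countLine).findIdx? (fun c => 0 < c) = text.findIdx? matchesLine := by
  rw [List.findIdx?_map]
  congr 1
  funext line
  simp only [Function.comp, countLine, matchesLine]
  rw [Bool.eq_iff_iff]
  simp [List.countP_pos_iff, List.any_eq_true]

-- B's early-return loop computed
theorem altGo_eq (text lines : List String) (j : Nat) :
    altGo text j lines =
      match lines.findIdx? matchesLine with
      | none => text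
      | some k => text.take (j + k) := by
  induction lines generalizing j with
  | nil => simp [altGo]
  | cons line rest ih =>
    rw [altGo, List.findIdx?_cons]
    by_cases h : matchesLine line
    · simp [h]
    · simp only [h, if_false, Bool.false_eq_true, ih (j+1)]
      rcases hfind : rest.findIdx? matchesLine with _ | k
      · simp
      · simp only [Option.map_some]
        rw [show j + 1 + k = j + (k + 1) from by omega]

theorem takeWhile_eq_take_findIdx (text : List String) (k : Nat)
    (hk : text.findIdx? matchesLine = some k) :
    text.takeWhile (fun l => !matchesLine l) = text.take k := by
  induction text generalizing k with
  | nil => simp at hk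
  | cons line rest ih =>
    rw [List.findIdx?_cons] at hk
    by_cases h : matchesLine line
    · simp only [h, if_true] at hk
      obtain rfl : k = 0 := by simpa using hk.symm
      simp [List.takeWhile_cons, h]
    · simp only [h, Bool.false_eq_true, if_false] at hk
      rcases hfind : rest.findIdx? matchesLine with _ | k'
      · rw [hfind] at hk; simp at hk
      · rw [hfind] at hk
        simp only [Option.map_some, Option.some.injEq] at hk
        subst hk
        simp [List.takeWhile_cons, h, ih k' hfind]

theorem sum_counts_pos (text : List String) (k : Nat)
    (hk : text.findIdx? matchesLine = some k) :
    0 < (text.map countLine).sum := by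
  have hmem : ∃ l ∈ text, matchesLine l = true := by
    have := List.findIdx?_eq_some_iff_findIdx_eq.1 hk
    have hlt : k < text.length := this.1
    have : matchesLine (text.get ⟨k, hlt⟩) = true := by
      have h2 := List.findIdx?_eq_some_iff_getElem.1 hk
      obtain ⟨_, hp, _⟩ := h2
      simpa using hp
    exact ⟨_, List.get_mem _ _, this⟩
  obtain ⟨l, hl, hml⟩ := hmem
  have hc : 0 < countLine l := by
    rw [countLine, List.countP_pos_iff]
    simpa [matchesLine, List.any_eq_true] using hml
  calc 0 < countLine l := hc
    _ ≤ (text.map countLine).sum := List.single_le_sum (by simp) _ (List.mem_map_of_mem hl)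

theorem D_iff (text : List String) :
    D_remove_footer text ↔
      (text.any matchesLine = true ∧ "\n" ∈ text.takeWhile (fun l => !matchesLine l)) := Iff.rfl

-- ===== VERDICT (by name: the statement is the Claim_ definition above) =====
theorem remove_footer_spec : Claim_unchanged_remove_footer := by
  intro text _ hD
  rw [remove_footer_eq_outer, outerA_main, findIdx_counts, remove_footer_alt, altGo_eq]
  rcases hfind : text.findIdx? matchesLine with _ | k
  · simp
  · simp only [Nat.zero_add]
    have hany : text.any matchesLine = true := by
      rw [List.any_eq_true]
      have h2 := List.findIdx?_eq_some_iff_getElem.1 hfind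
      obtain ⟨hlt, hp, _⟩ := h2
      exact ⟨text[k], by simp, by simpa using hp⟩
    have hnl : "\n" ∉ text.take k := by
      rw [← takeWhile_eq_take_findIdx text k hfind]
      intro hmem
      exact hD ((D_iff text).2 ⟨hany, hmem⟩)
    have hfix : stripNl (text.take k) = text.take k := stripNl_of_not_mem _ hnl
    rw [Function.iterate_fixed hfix]

theorem remove_footer_changed : Claim_changed_remove_footer := by
  unfold Claim_changed_remove_footer; decide

theorem remove_footer_tight : Claim_exact_remove_footer := by
  intro text _ hD heq
  obtain ⟨hany, hnl⟩ := (D_iff text).1 hD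
  obtain ⟨l, hl, hml⟩ := List.any_eq_true.1 hany
  rcases hfind : text.findIdx? matchesLine with _ | k
  · rw [List.findIdx?_eq_none_iff] at hfind
    exact absurd (hfind l hl) (by simp [hml])
  · have hnl' : "\n" ∈ text.take k := by
      rwa [takeWhile_eq_take_findIdx text k hfind] at hnl
    have hApos : (remove_footer text).length < (text.take k).length := by
      rw [remove_footer_eq_outer, outerA_main, findIdx_counts, hfind]
      simp only [Nat.zero_add]
      obtain ⟨m, hm⟩ : ∃ m, (text.map countLine).sum = m + 1 := by
        have := sum_counts_pos text k hfind
        exact ⟨(text.map countLine).sum - 1, by omega⟩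
      rw [hm, Function.iterate_succ_apply]
      calc (stripNl^[m] (stripNl (text.take k))).length
          ≤ (stripNl (text.take k)).length := length_iterate_stripNl_le _ _
        _ < (text.take k).length := by
            rw [stripNl, if_pos (by simpa using hnl')]
            have := length_removeNl_lt (text.take k) hnl'
            omega
    have hB : remove_footer_alt text = text.take k := by
      rw [remove_footer_alt, altGo_eq, hfind]
      simp
    rw [heq, hB] at hApos
    omega
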